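-- pv_equiv track=rewrite | github.com/colombo0718/autoQuotes | accountSystemServer.py | find_by_name
-- ===== SOURCE A (Python) =====
-- def find_by_name(data, name: str):
--     # 先精準
--     for c in data:
--         if c.get("company_name") == name:
--             return c
--     # 再模糊（回第一筆）
--     for c in data:
--         if name in c.get("company_name", ""):
--             return c
--     return None
-- ===== SOURCE B (Python) =====
-- def find_by_name(data, name: str):
--     # single pass: return first exact match immediately; remember first fuzzy match
--     fuzzy = None
--     for c in data:
--         cn = c.get("company_name")
--         if cn == name:
--             return c
--         if fuzzy is None and name in (cn if cn is not None else ""):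
--             fuzzy = c
--     return fuzzy
-- ===== Notes on version B (the rewrite author's own statement) =====
-- stated objective: alternative
-- what changed: Replaces A's two full scans (exact pass then fuzzy pass) with a single loop that returns immediately on an exact match and carries the first substring match in an accumulator returned after the loop.
import Mathlib
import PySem

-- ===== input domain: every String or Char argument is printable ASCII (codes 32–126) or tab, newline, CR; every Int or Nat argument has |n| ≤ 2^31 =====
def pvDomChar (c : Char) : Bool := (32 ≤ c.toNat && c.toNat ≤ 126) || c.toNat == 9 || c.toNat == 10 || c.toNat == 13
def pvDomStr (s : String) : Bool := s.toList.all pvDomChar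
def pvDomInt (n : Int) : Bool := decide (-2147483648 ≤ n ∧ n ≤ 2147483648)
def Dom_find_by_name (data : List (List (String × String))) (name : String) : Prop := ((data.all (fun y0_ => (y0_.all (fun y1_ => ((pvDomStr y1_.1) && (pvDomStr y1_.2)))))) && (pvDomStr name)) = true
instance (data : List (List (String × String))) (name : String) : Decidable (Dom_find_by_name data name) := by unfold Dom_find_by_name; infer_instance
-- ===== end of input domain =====

-- B changes the decomposition (one pass with a remembered fuzzy candidate instead of A's two scans); return value only, no side effects.

-- ===== PORT A =====
-- first loop of A: first record whose "company_name" equals name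
def fbnExact (data : List (List (String × String))) (name : String) : Option (List (String × String)) :=
  match data with
  | [] => none
  | c :: rest =>
    if (PySem.Dict.mk c).get? "company_name" = some name then some c
    else fbnExact rest name

-- second loop of A: first record with name a substring of c.get("company_name", "")
def fbnFuzzy (data : List (List (String × String))) (name : String) : Option (List (String × String)) :=
  match data with
  | [] => none
  | c :: rest =>
    if PySem.Str.isIn name ((PySem.Dict.mk c).getD "company_name" "") then some c
    else fbnFuzzy rest name

def find_by_name (data : List (List (String × String))) (name : String) : Option (List (String × String)) :=
  match fbnExact data name with
  | some c => some c
  | none =>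
    match fbnFuzzy data name with
    | some c => some c
    | none => none

-- ===== PORT B =====
-- single loop carrying the first fuzzy match in `fuzzy`
def fbnGo (data : List (List (String × String))) (name : String)
    (fuzzy : Option (List (String × String))) : Option (List (String × String)) :=
  match data with
  | [] => fuzzy
  | c :: rest =>
    let cn := (PySem.Dict.mk c).get? "company_name"
    if cn = some name then some c
    else
      fbnGo rest name
        (if fuzzy = none ∧ PySem.Str.isIn name (cn.getD "") then some c else fuzzy)

def find_by_name_alt (data : List (List (String × String))) (name : String) : Option (List (String × String)) :=
  fbnGo data name none

-- ===== PRECONDITION & SPEC =====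
def Spec_find_by_name (data : List (List (String × String))) (name : String) (out : Option (List (String × String))) : Prop := out = find_by_name_alt data name
instance (data : List (List (String × String))) (name : String) (out : Option (List (String × String))) : Decidable (Spec_find_by_name data name out) := by unfold Spec_find_by_name; infer_instance

-- ===== CLAIM (what is proved, stated in full; the proofs are below) =====
def Claim_equal_find_by_name : Prop := ∀ (data : List (List (String × String))) (name : String), Dom_find_by_name data name → Spec_find_by_name data name (find_by_name data name)

-- ===== LEMMAS AND PROOFS =====

-- getD with default "" agrees with get? plus Option.getD
theorem fbn_getD_eq (c : List (String × String)) :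
    (PySem.Dict.mk c).getD "company_name" "" = ((PySem.Dict.mk c).get? "company_name").getD "" := by
  exact PySem.Dict.getD_eq_get?_getD _ _ _

-- invariant of B's loop: exact match wins, else the carried fuzzy, else the fuzzy scan
theorem fbnGo_eq (data : List (List (String × String))) (name : String)
    (fz : Option (List (String × String))) :
    fbnGo data name fz =
      match fbnExact data name with
      | some c => some c
      | none => match fz with
        | some x => some x
        | none => fbnFuzzy data name := by
  induction data generalizing fz with
  | nil => cases fz <;> simp [fbnGo, fbnExact, fbnFuzzy]
  | cons c rest ih =>
    simp only [fbnGo, fbnExact, fbnFuzzy, fbn_getD_eq]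
    by_cases hx : (PySem.Dict.mk c).get? "company_name" = some name
    · simp [hx]
    · simp only [hx, if_false, ih]
      cases fz with
      | some x => simp
      | none =>
        by_cases hf : PySem.Chars.isIn name.toList
            (((PySem.Dict.mk c).get? "company_name").getD "").toList = true <;>
          cases fbnExact rest name <;> simp [hf]

-- ===== VERDICT (by name: the statement is the Claim_ definition above) =====
theorem find_by_name_spec : Claim_equal_find_by_name := by
  intro data name _
  unfold Spec_find_by_name find_by_name find_by_name_alt
  rw [fbnGo_eq]
  cases hE : fbnExact data name <;> cases hF : fbnFuzzy data name <;> simp
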